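-- pv_equiv track=rewrite | github.com/2024-2-analitica-descriptiva/2024-2-LAB-01-programacion-basica-en-python-matorop | homework/pregunta_02.py | contar_registros
-- ===== SOURCE A (Python) =====
-- def contar_registros(lista):
--     contador = {}
--     for item in lista:
--         if item in contador:
--             contador[item] += 1
--         else:
--             contador[item] = 1
--     # Convierte el diccionario en una lista de tuplas y ordénalas alfabéticamente
--     resultado = sorted(contador.items())
--     return resultado
-- ===== SOURCE B (Python) =====
-- def contar_registros(lista):
--     orden = sorted(lista)
--     resultado = []
--     i = 0
--     n = len(orden)
--     while i < n:
--         j = i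
--         while j < n and orden[j] == orden[i]:
--             j += 1
--         resultado.append((orden[i], j - i))
--         i = j
--     return resultado
-- ===== Notes on version B (the rewrite author's own statement) =====
-- stated objective: alternative
-- what changed: B replaces the dict-counting pass followed by a sort of the items with sort-first-then-group: it sorts the input once and emits (value, run length) for each maximal run of equal elements, maintaining no dictionary.
import Mathlib
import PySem

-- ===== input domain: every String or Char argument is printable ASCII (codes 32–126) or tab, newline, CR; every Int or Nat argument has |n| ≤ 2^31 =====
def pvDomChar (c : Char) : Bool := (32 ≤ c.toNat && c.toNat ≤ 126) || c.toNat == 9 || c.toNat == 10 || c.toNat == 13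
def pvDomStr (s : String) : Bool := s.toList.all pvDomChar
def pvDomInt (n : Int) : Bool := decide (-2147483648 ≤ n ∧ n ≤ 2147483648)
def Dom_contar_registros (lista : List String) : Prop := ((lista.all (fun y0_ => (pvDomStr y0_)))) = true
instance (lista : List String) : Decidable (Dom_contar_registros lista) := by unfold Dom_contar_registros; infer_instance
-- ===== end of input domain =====

-- B counts by sorting once and scanning maximal runs of equal elements, instead of A's dict counting followed by sorting the items.

-- ===== PORT A =====
-- dict-count loop, then sorted(contador.items()) (tuple comparison = lexicographic on (key, count))
def contar_registros (lista : List String) : List (String × Int) :=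
  let contador := lista.foldl
    (fun d item => if d.contains item then d.insert item (d.getD item 0 + 1) else d.insert item 1)
    PySem.Dict.empty
  PySem.List.sorted2 contador.items Prod.fst Prod.snd false

-- ===== PORT B =====
-- the nested while loops over indices of the sorted list: the inner while counts the run
-- of elements equal to orden[i] (takeWhile), the outer resumes at its end (dropWhile)
def pvRuns : List String → List (String × Int)
  | [] => []
  | x :: xs =>
      (x, 1 + ((xs.takeWhile (· == x)).length : Int)) :: pvRuns (xs.dropWhile (· == x))
  termination_by l => l.length
  decreasing_by
    simp only [List.length_cons]
    exact Nat.lt_succ_of_le (List.length_dropWhile_le _ _)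

def contar_registros_alt (lista : List String) : List (String × Int) :=
  pvRuns (PySem.List.sorted lista (fun x => x) false)

-- ===== PRECONDITION & SPEC =====
def Spec_contar_registros (lista : List String) (out : List (String × Int)) : Prop := out = contar_registros_alt lista
instance (lista : List String) (out : List (String × Int)) : Decidable (Spec_contar_registros lista out) := by unfold Spec_contar_registros; infer_instance

-- ===== CLAIM (what is proved, stated in full; the proofs are below) =====
def Claim_equal_contar_registros : Prop := ∀ (lista : List String), Dom_contar_registros lista → Spec_contar_registros lista (contar_registros lista)

-- ===== LEMMAS AND PROOFS =====

lemma pv_insertBy_congr {α : Type} (p q : α → α → Bool) (x : α) (ys : List α)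
    (h : ∀ b ∈ ys, p x b = q x b) :
    PySem.List.insertBy p x ys = PySem.List.insertBy q x ys := by
  induction ys with
  | nil => rfl
  | cons y ys ih =>
      simp only [PySem.List.insertBy]
      rw [h y (List.mem_cons_self ..)]
      split
      · rfl
      · rw [ih (fun b hb => h b (List.mem_cons_of_mem _ hb))]

lemma pv_foldl_insertBy_congr {α : Type} (p q : α → α → Bool) (S : List α)
    (hpq : ∀ a ∈ S, ∀ b ∈ S, p a b = q a b) :
    ∀ (xs acc : List α), (∀ a ∈ xs, a ∈ S) → (∀ b ∈ acc, b ∈ S) →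
    List.foldl (fun acc x => PySem.List.insertBy p x acc) acc xs
      = List.foldl (fun acc x => PySem.List.insertBy q x acc) acc xs := by
  intro xs
  induction xs with
  | nil => intro acc _ _; rfl
  | cons x xs ih =>
      intro acc hxs hacc
      have hx : x ∈ S := hxs x (List.mem_cons_self ..)
      simp only [List.foldl_cons]
      rw [pv_insertBy_congr p q x acc (fun b hb => hpq x hx b (hacc b hb))]
      exact ih _ (fun a ha => hxs a (List.mem_cons_of_mem _ ha))
        (fun b hb => by
          rcases (PySem.List.mem_insertBy ..).mp hb with h | h
          · exact h ▸ hx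
          · exact hacc b h)

lemma pv_sorted2_eq_sorted_fst (xs : List (String × Int)) (h : (xs.map Prod.fst).Nodup) :
    PySem.List.sorted2 xs Prod.fst Prod.snd false = PySem.List.sorted xs (fun p => p.1) false := by
  have hinj : ∀ a ∈ xs, ∀ b ∈ xs, a.1 = b.1 → a = b := by
    intro a ha b hb hab
    exact List.inj_on_of_nodup_map h ha hb hab
  simp only [PySem.List.sorted2, PySem.List.sorted, if_neg (by decide : ¬ (false = true))]
  apply pv_foldl_insertBy_congr _ _ xs _ xs [] (fun a ha => ha) (fun b hb => absurd hb (List.not_mem_nil))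
  intro a ha b hb
  by_cases hfst : a.1 = b.1
  · have : a = b := hinj a ha b hb hfst
    subst this
    simp
  · rcases lt_or_gt_of_ne hfst with hlt | hgt
    · simp [hlt]
    · simp [hgt, not_lt_of_gt hgt]

-- the counting loop with the membership branch IS Counter(lista)
lemma pv_fold_eq_counter (lista : List String) :
    lista.foldl
      (fun d item => if d.contains item then d.insert item (d.getD item 0 + 1) else d.insert item 1)
      PySem.Dict.empty = PySem.Dict.counter lista := by
  rw [PySem.List.foldl_congr_mem lista _
      (fun d item => d.insert item (d.getD item 0 + 1)) PySem.Dict.empty]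
  · exact PySem.Dict.foldl_insert_getD_add_one_eq_counter lista
  · intro acc x _
    by_cases hc : acc.contains x = true
    · simp [hc]
    · rw [if_neg hc, PySem.Dict.getD_of_not_contains acc 0 (by simpa using hc)]; norm_num

-- in a ≤-sorted list whose elements are all ≥ x, the initial run of x's holds every x,
-- and everything after it is strictly greater than x
lemma pv_run_facts (x : String) : ∀ (xs : List String),
    (∀ y ∈ xs, x ≤ y) → xs.Pairwise (· ≤ ·) →
    ((xs.takeWhile (· == x)).length = xs.count x ∧ ∀ y ∈ xs.dropWhile (· == x), x < y) := by
  intro xs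
  induction xs with
  | nil => intro _ _; simp
  | cons y ys ih =>
      intro hge hp
      rcases List.pairwise_cons.mp hp with ⟨hy, hys⟩
      by_cases hyx : y = x
      · subst hyx
        have hge' : ∀ z ∈ ys, y ≤ z := fun z hz => hy z hz
        obtain ⟨h1, h2⟩ := ih hge' hys
        constructor
        · simp [h1]
        · simpa [List.dropWhile_cons] using h2
      · have hxy : x < y := lt_of_le_of_ne (hge y (List.mem_cons_self ..)) (Ne.symm hyx)
        have hbeq : (y == x) = false := by simpa using hyx
        constructor
        · have hc0 : ys.count x = 0 := by
            rw [List.count_eq_zero]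
            intro hmem
            exact absurd (lt_of_lt_of_le hxy (hy x hmem)) (lt_irrefl x)
          simp [hbeq, hc0, hyx]
        · intro z hz
          rw [List.dropWhile_cons, hbeq] at hz
          simp only [Bool.false_eq_true, if_false] at hz
          rcases List.mem_cons.mp hz with h | h
          · exact h ▸ hxy
          · exact lt_of_lt_of_le hxy (hy z h)

lemma pv_pvRuns_spec : ∀ (l : List String), l.Pairwise (· ≤ ·) →
    ((∀ k c, ((k, c) ∈ pvRuns l ↔ (k ∈ l ∧ c = (l.count k : Int)))) ∧
     (pvRuns l).Pairwise (fun a b => a.1 < b.1)) := by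
  intro l
  induction l using pvRuns.induct with
  | case1 => intro _; simp [pvRuns]
  | case2 x xs ih =>
      intro hp
      rcases List.pairwise_cons.mp hp with ⟨hx, hxs⟩
      obtain ⟨htake, hdrop⟩ := pv_run_facts x xs hx hxs
      have hxs' : (xs.dropWhile (· == x)).Pairwise (· ≤ ·) :=
        List.Pairwise.sublist (List.dropWhile_sublist _) hxs
      obtain ⟨ihmem, ihpw⟩ := ih hxs'
      -- counts in the full list vs the tail past the run
      have hsplit : xs = xs.takeWhile (· == x) ++ xs.dropWhile (· == x) :=
        (List.takeWhile_append_dropWhile).symm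
      have hcount_ne : ∀ k, k ≠ x → xs.count k = (xs.dropWhile (· == x)).count k := by
        intro k hk
        conv_lhs => rw [hsplit]
        rw [List.count_append, List.count_eq_zero.mpr, Nat.zero_add]
        intro hmem
        have := List.mem_takeWhile_imp hmem
        exact hk (by simpa using this)
      constructor
      · intro k c
        simp only [pvRuns, List.mem_cons]
        constructor
        · rintro (heq | hmem)
          · rcases Prod.mk.injEq .. ▸ heq with ⟨hk, hc⟩
            refine ⟨by simp [hk], ?_⟩
            rw [hc, hk, htake, List.count_cons_self]
            push_cast; ring
          · obtain ⟨hkmem, hc⟩ := (ihmem k c).mp hmem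
            have hkx : k ≠ x := by
              intro h; subst h
              exact absurd (hdrop k hkmem) (lt_irrefl k)
            refine ⟨Or.inr (hsplit ▸ List.mem_append_right _ hkmem), ?_⟩
            simp [hc, Ne.symm hkx, hcount_ne k hkx]
        · rintro ⟨hkmem, hc⟩
          by_cases hkx : k = x
          · left
            subst hkx
            simp only [Prod.mk.injEq, true_and]
            rw [hc]
            simp only [List.count_cons_self]
            rw [← htake]
            push_cast; ring
          · right
            apply (ihmem k c).mpr
            have hkxs : k ∈ xs := by
              rcases hkmem with h | h
              · exact absurd h hkx
              · exact h
            have hkdrop : k ∈ xs.dropWhile (· == x) := by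
              rcases List.mem_append.mp (hsplit ▸ hkxs) with h | h
              · exact absurd (by simpa using List.mem_takeWhile_imp h) hkx
              · exact h
            exact ⟨hkdrop, by simp [hc, Ne.symm hkx, hcount_ne k hkx]⟩
      · simp only [pvRuns]
        apply List.pairwise_cons.mpr
        refine ⟨?_, ihpw⟩
        intro p hp'
        obtain ⟨k, c⟩ := p
        obtain ⟨hmem, _⟩ := (ihmem _ _).mp hp'
        exact hdrop _ hmem

-- the two ports agree
lemma pv_main (lista : List String) : contar_registros lista = contar_registros_alt lista := by
  have hitems : (PySem.Dict.counter lista).items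
      = (PySem.Set.ofList lista).map (fun k => (k, (lista.count k : Int))) :=
    PySem.Dict.items_counter lista
  have hnodupfst : ((PySem.Dict.counter lista).items.map Prod.fst).Nodup := by
    rw [hitems, List.map_map]
    have hid : (Prod.fst ∘ fun k : String => (k, (lista.count k : Int))) = id := rfl
    rw [hid, List.map_id]
    exact PySem.Set.nodup_ofList lista
  have hsorted_perm : (PySem.List.sorted lista (fun x => x) false).Perm lista :=
    PySem.List.sorted_perm lista (fun x => x) false
  have hsp : (PySem.List.sorted lista (fun x => x) false).Pairwise (· ≤ ·) :=
    PySem.List.sorted_pairwise lista (fun x => x)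
  obtain ⟨hmem, hpw⟩ := pv_pvRuns_spec _ hsp
  -- Perm between pvRuns of the sorted list and the counter's items
  have hperm : (pvRuns (PySem.List.sorted lista (fun x => x) false)).Perm
      ((PySem.Dict.counter lista).items) := by
    have hnodup_runs : (pvRuns (PySem.List.sorted lista (fun x => x) false)).Nodup :=
      hpw.imp fun h heq => absurd (heq ▸ h) (lt_irrefl _)
    have hnodup_items : ((PySem.Dict.counter lista).items).Nodup :=
      List.Nodup.of_map _ hnodupfst
    rw [List.perm_ext_iff_of_nodup hnodup_runs hnodup_items]
    rintro ⟨k, c⟩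
    rw [hmem k c, hitems, List.mem_map]
    constructor
    · rintro ⟨hk, hc⟩
      refine ⟨k, (PySem.Set.mem_ofList ..).mpr (hsorted_perm.mem_iff.mp hk), ?_⟩
      rw [hc, hsorted_perm.count_eq]
    · rintro ⟨k', hk', heq⟩
      rcases Prod.mk.injEq .. ▸ heq with ⟨hk, hc⟩
      subst hk
      exact ⟨hsorted_perm.mem_iff.mpr ((PySem.Set.mem_ofList ..).mp hk'),
        by rw [← hc, hsorted_perm.count_eq]⟩
  show (let contador := lista.foldl _ PySem.Dict.empty;
        PySem.List.sorted2 contador.items Prod.fst Prod.snd false) = _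
  simp only [pv_fold_eq_counter]
  rw [pv_sorted2_eq_sorted_fst _ hnodupfst]
  exact PySem.List.sorted_eq_of_perm_of_pairwise_lt _ _ _ hperm hpw

-- ===== VERDICT (by name: the statement is the Claim_ definition above) =====
theorem contar_registros_spec : Claim_equal_contar_registros := by
  intro lista _
  exact pv_main lista
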